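-- pv_equiv track=rewrite | github.com/NigrumAquila/py_checkio | polygon/what_does_the_cow_say.py | cowsay
-- ===== SOURCE A (Python) =====
-- COW = r'''
--         \   ^__^
--          \  (oo)\_______
--             (__)\       )\/\
--                 ||----w |
--                 ||     ||
-- '''
--
-- def lines(text): # can be improved with textwrap module?
--     if len(text) <= 39:
--         return [text] if text else []
--     try:
--         i = text.rindex(' ',0,40)
--     except ValueError: # no space in text[:39], I cut the text.
--         return [text[:39]] + lines(text[39:])
--     else:
--         return [text[:i]] + lines(text[i+1:])
--
-- def cowsay(text):
--     #text = ' '.join(text.split()) # tested and longer than while loop.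
--     while ' '*2 in text: text = text.replace(' '*2, ' ')
--     #text = re.sub(r'\s{2,}', ' ', text) # but I don't want to import re (and longer)
--     text = lines(text)
--     max_len = max(map(len, text)) # maximum length of lines
--     border = lambda ch: ' ' + ch * (max_len + 2) # top/bottom lines
--     if len(text)==1:
--         res = [f'< {text[0]} >']
--     else:
--         N = len(text) - 2 # number of lines with text
--         res = [' '.join([first, t.ljust(max_len, ' '), last])
--                for t, first, last in zip(text, '/'+'|'*N+'\\', '\\'+'|'*N+'/')]
--     res = ['', border('_')] + res + [border('-')]
--     return '\n'.join(res) + COW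
-- ===== SOURCE B (Python) =====
-- COW = r'''
--         \   ^__^
--          \  (oo)\_______
--             (__)\       )\/\
--                 ||----w |
--                 ||     ||
-- '''
--
-- def cowsay(text):
--     # collapse runs of spaces in ONE left-to-right pass (instead of repeated .replace)
--     out = []
--     prev_space = False
--     for ch in text:
--         if ch == ' ' and prev_space:
--             continue
--         out.append(ch)
--         prev_space = (ch == ' ')
--     text = ''.join(out)
--     # wrap iteratively with an accumulator (instead of tail recursion)
--     ls = []
--     while len(text) > 39:
--         i = text.rfind(' ', 0, 40)
--         if i == -1:
--             ls.append(text[:39]); text = text[39:]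
--         else:
--             ls.append(text[:i]); text = text[i+1:]
--     if text:
--         ls.append(text)
--     maxlen = max(map(len, ls))  # raises on empty input, like A
--     # build the box explicitly: first / middle / last line (instead of zip with '/'+'|'*N+'\\')
--     if len(ls) == 1:
--         body = ['< ' + ls[0] + ' >']
--     else:
--         body = ['/ ' + ls[0].ljust(maxlen) + ' \\']
--         for l in ls[1:-1]:
--             body.append('| ' + l.ljust(maxlen) + ' |')
--         body.append('\\ ' + ls[-1].ljust(maxlen) + ' /')
--     res = ['', ' ' + '_' * (maxlen + 2)] + body + [' ' + '-' * (maxlen + 2)]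
--     return '\n'.join(res) + COW
-- ===== Notes on version B (the rewrite author's own statement) =====
-- stated objective: faster
-- what changed: Space-collapse is one linear pass with a previous-char flag instead of repeated whole-string replace(' ',' ') until fixpoint, line-wrapping is an explicit loop with an accumulator instead of tail recursion, and the box is built with explicit first/middle/last lines instead of a zip against '/'+'|'*N+'\\'.
-- outside the precondition, e.g. on cowsay(''): A raises ValueError, B raises ValueError
import Mathlib
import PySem

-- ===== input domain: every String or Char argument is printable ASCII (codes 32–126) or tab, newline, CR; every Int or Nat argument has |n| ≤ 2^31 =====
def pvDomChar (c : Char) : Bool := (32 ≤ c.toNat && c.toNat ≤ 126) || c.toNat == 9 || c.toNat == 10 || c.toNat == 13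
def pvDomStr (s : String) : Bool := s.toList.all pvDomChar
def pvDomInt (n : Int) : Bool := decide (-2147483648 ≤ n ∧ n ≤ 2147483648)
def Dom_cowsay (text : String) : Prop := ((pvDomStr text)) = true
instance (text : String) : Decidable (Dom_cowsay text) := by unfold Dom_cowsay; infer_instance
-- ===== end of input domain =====

-- B reimplements cowsay with a one-pass space collapse, an iterative (accumulator) line
-- wrapper instead of tail recursion, and an explicit first/middle/last box builder instead
-- of a zip against '/'+'|'*N+'\'; objective: alternative decomposition (same output).


-- shared helpers (identical trivial expressions in both Pythons)

-- the COW picture, exactly the module constant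
def cowChars : List Char :=
  "\n        \\   ^__^\n         \\  (oo)\\_______\n            (__)\\       )\\/\\\n                ||----w |\n                ||     ||\n".toList

-- t.ljust(m, ' ')
def ljustSp (t : List Char) (m : Nat) : List Char := t ++ List.replicate (m - t.length) ' '

-- max(map(len, ls)); Python raises ValueError on ls = [] (excluded by Pre_cowsay), here 0
def pyMaxLen (ls : List (List Char)) : Nat :=
  ((PySem.List.max? (ls.map List.length) (fun n => n)).getD 0)

-- border(ch) = ' ' + ch * (max_len + 2)
def borderC (ch : Char) (m : Nat) : List Char := ' ' :: List.replicate (m + 2) ch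

-- text.rfind(' ', 0, 40)  (A's text.rindex(' ', 0, 40) raises exactly where this is -1)
def rfindSp40 (l : List Char) : Int := PySem.Chars.rfindFrom l [' '] 0 (some 40)

-- ===== PORT A =====

-- '  ' in text: hand port of the 2-char containment test (exact: some adjacent pair of
-- spaces); kept structural so the while-loop's termination and the proofs can recurse on it
def hasDS : List Char → Bool
  | [] => false
  | [_] => false
  | c :: c2 :: rest => (c == ' ' && c2 == ' ') || hasDS (c2 :: rest)

-- text.replace('  ', ' '): hand port, exact for this fixed pattern — Python replaces
-- non-overlapping occurrences left to right, which for a 2-char pattern is this recursion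
def replaceDS : List Char → List Char
  | [] => []
  | [c] => [c]
  | c :: c2 :: rest =>
    if c == ' ' && c2 == ' ' then ' ' :: replaceDS rest
    else c :: replaceDS (c2 :: rest)

theorem replaceDS_length_le (l : List Char) : (replaceDS l).length ≤ l.length := by
  induction l using replaceDS.induct with
  | case1 => simp [replaceDS]
  | case2 => simp [replaceDS]
  | case3 c c2 rest h ih =>
      obtain ⟨hc, hc2⟩ : c = ' ' ∧ c2 = ' ' := by simpa using h
      subst hc; subst hc2
      simp only [List.length_cons] at ih ⊢
      simp [replaceDS]
      omega
  | case4 c c2 rest h ih =>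
      simp only [List.length_cons] at ih ⊢
      simp only [replaceDS]
      rw [if_neg (by simp [h])]
      simp only [List.length_cons]
      omega

theorem replaceDS_length_lt (l : List Char) (h : hasDS l = true) :
    (replaceDS l).length < l.length := by
  induction l using replaceDS.induct with
  | case1 => simp [hasDS] at h
  | case2 => simp [hasDS] at h
  | case3 c c2 rest hds ih =>
      have hle := replaceDS_length_le rest
      obtain ⟨hc, hc2⟩ : c = ' ' ∧ c2 = ' ' := by simpa using hds
      subst hc; subst hc2
      simp only [List.length_cons] at hle ⊢
      simp [replaceDS]
      omega
  | case4 c c2 rest hds ih =>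
      simp only [hasDS, hds, Bool.false_or] at h
      have hlt := ih h
      simp only [List.length_cons] at hlt ⊢
      simp only [replaceDS]
      rw [if_neg (by simp [hds])]
      simp only [List.length_cons]
      omega

-- while '  ' in text: text = text.replace('  ', ' ')
def collapseA (l : List Char) : List Char :=
  if h : hasDS l = true then collapseA (replaceDS l) else l
  termination_by l.length
  decreasing_by exact replaceDS_length_lt l h

-- lines(text): A's recursion on the string tail
def linesA (l : List Char) : List (List Char) :=
  if _h : l.length ≤ 39 then (if l.isEmpty then [] else [l])
  else
    if rfindSp40 l = -1 then l.take 39 :: linesA (l.drop 39)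
    else l.take (rfindSp40 l).toNat :: linesA (l.drop ((rfindSp40 l).toNat + 1))
  termination_by l.length
  decreasing_by
  · simp only [List.length_drop]; omega
  · simp only [List.length_drop]; omega

-- the zip-comprehension box: zip(text, '/'+'|'*N+'\', '\'+'|'*N+'/')
def boxA (ls : List (List Char)) (m : Nat) : List (List Char) :=
  if ls.length == 1 then [['<', ' '] ++ ls.headD [] ++ [' ', '>']]
  else
    (ls.zip (('/' :: (List.replicate (ls.length - 2) '|' ++ ['\\'])).zip
             ('\\' :: (List.replicate (ls.length - 2) '|' ++ ['/'])))).map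
      (fun p => [p.2.1, ' '] ++ ljustSp p.1 m ++ [' ', p.2.2])

-- res = ['', border('_')] + res + [border('-')]; '\n'.join(res) + COW
def assembleA (ls : List (List Char)) : List Char :=
  List.intercalate ['\n']
    ([[], borderC '_' (pyMaxLen ls)] ++ boxA ls (pyMaxLen ls) ++ [borderC '-' (pyMaxLen ls)]) ++ cowChars

def cowsay (text : String) : String :=
  String.ofList (assembleA (linesA (collapseA text.toList)))

-- ===== PORT B =====

-- the one-pass collapse: keep a char unless it is a space following a kept space
def collapse1 (prev : Bool) : List Char → List Char
  | [] => []
  | c :: rest =>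
    if c == ' ' && prev then collapse1 true rest
    else c :: collapse1 (c == ' ') rest

-- the iterative wrapper: loop while len > 39, appending chunks to an accumulator
def linesB (acc : List (List Char)) (l : List Char) : List (List Char) :=
  if _h : l.length > 39 then
    if rfindSp40 l = -1 then linesB (acc ++ [l.take 39]) (l.drop 39)
    else linesB (acc ++ [l.take (rfindSp40 l).toNat]) (l.drop ((rfindSp40 l).toNat + 1))
  else if l.isEmpty then acc else acc ++ [l]
  termination_by l.length
  decreasing_by
  · simp only [List.length_drop]; omega
  · simp only [List.length_drop]; omega

-- the explicit box: first line, middle lines over ls[1:-1], last line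
def boxB (ls : List (List Char)) (m : Nat) : List (List Char) :=
  match ls with
  | [] => []
  | [t] => [['<', ' '] ++ t ++ [' ', '>']]
  | t :: rest =>
    (['/', ' '] ++ ljustSp t m ++ [' ', '\\']) ::
      (rest.dropLast.map (fun u => ['|', ' '] ++ ljustSp u m ++ [' ', '|']) ++
       [['\\', ' '] ++ ljustSp (rest.getLastD []) m ++ [' ', '/']])

def assembleB (ls : List (List Char)) : List Char :=
  List.intercalate ['\n']
    ([[], borderC '_' (pyMaxLen ls)] ++ boxB ls (pyMaxLen ls) ++ [borderC '-' (pyMaxLen ls)]) ++ cowChars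

def cowsay_alt (text : String) : String :=
  String.ofList (assembleB (linesB [] (collapse1 false text.toList)))

-- ===== PRECONDITION & SPEC =====
-- Pre_ excludes only the empty string, on which A's max(map(len, [])) raises ValueError
-- (B raises there too).
def Pre_cowsay (text : String) : Prop := text ≠ ""
instance (text : String) : Decidable (Pre_cowsay text) := by unfold Pre_cowsay; infer_instance
def pvWitness_cowsay : String := "moo  moo"

def Spec_cowsay (text : String) (out : String) : Prop := out = cowsay_alt text
instance (text : String) (out : String) : Decidable (Spec_cowsay text out) := by unfold Spec_cowsay; infer_instance

-- ===== CLAIM (what is proved, stated in full; the proofs are below) =====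
def Claim_equal_cowsay : Prop := ∀ (text : String), Dom_cowsay text → Pre_cowsay text → Spec_cowsay text (cowsay text)

-- ===== LEMMAS AND PROOFS =====

-- one replace pass does not change the one-pass collapse
theorem collapse1_replaceDS (l : List Char) (p : Bool) :
    collapse1 p (replaceDS l) = collapse1 p l := by
  induction l using replaceDS.induct generalizing p with
  | case1 => rfl
  | case2 => rfl
  | case3 c c2 rest h ih =>
      obtain ⟨hc, hc2⟩ := by simpa using h
      subst hc; subst hc2
      cases p <;> simp [replaceDS, collapse1, ih]
  | case4 c c2 rest h ih =>
      simp only [replaceDS, h, Bool.false_eq_true, if_false]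
      cases p <;> by_cases hc : c = ' ' <;> simp [collapse1, hc, ih]

-- on a string with no double space the one-pass collapse is the identity
theorem collapse1_of_no_ds (l : List Char) (p : Bool) (h : hasDS l = false)
    (hp : p = true → l.head? ≠ some ' ') : collapse1 p l = l := by
  induction l generalizing p with
  | nil => rfl
  | cons c rest ih =>
      have hcp : (c == ' ' && p) = false := by
        cases p
        · simp
        · have := hp rfl; simp_all
      simp only [collapse1, hcp, Bool.false_eq_true, if_false, List.cons.injEq, true_and]
      apply ih
      · cases rest with
        | nil => rfl
        | cons c2 r2 => simp only [hasDS, Bool.or_eq_false_iff] at h; exact h.2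
      · intro hc
        cases rest with
        | nil => simp
        | cons c2 r2 =>
            simp only [hasDS, Bool.or_eq_false_iff, Bool.and_eq_false_iff] at h
            have hc' : c = ' ' := by simpa using hc
            rcases h.1 with h1 | h1
            · simp [hc'] at h1
            · simp only [List.head?_cons, ne_eq, Option.some.injEq]
              intro he
              rw [he] at h1
              simp at h1

theorem collapseA_eq (l : List Char) : collapseA l = collapse1 false l := by
  induction l using collapseA.induct with
  | case1 l h ih => rw [collapseA, dif_pos h, ih, collapse1_replaceDS]
  | case2 l h =>
      rw [collapseA, dif_neg h]
      exact (collapse1_of_no_ds l false (by simpa using h) (by simp)).symm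

-- the iterative wrapper computes acc ++ the recursive wrapper
theorem linesB_eq_aux (n : Nat) : ∀ l : List Char, l.length ≤ n →
    ∀ acc, linesB acc l = acc ++ linesA l := by
  induction n with
  | zero =>
      intro l hl acc
      have : l = [] := List.eq_nil_of_length_eq_zero (by omega)
      subst this
      rw [linesB, linesA]; simp
  | succ n ih =>
      intro l hl acc
      rw [linesB, linesA]
      by_cases h39 : l.length ≤ 39
      · rw [dif_neg (by omega), dif_pos h39]
        split <;> simp
      · rw [dif_pos (by omega), dif_neg h39]
        by_cases hi : rfindSp40 l = -1
        · rw [if_pos hi, if_pos hi, ih _ (by simp only [List.length_drop]; omega)]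
          simp
        · rw [if_neg hi, if_neg hi, ih _ (by simp only [List.length_drop]; omega)]
          simp

theorem linesB_eq (l : List Char) : linesB [] l = linesA l := by
  simpa using linesB_eq_aux l.length l le_rfl []

-- zipping the middle lines against '|'*N pairs each with ('|','|'), the last with ('\','/')
theorem zip_mid (mids : List (List Char)) (last : List Char) :
    (mids ++ [last]).zip ((List.replicate mids.length '|' ++ ['\\']).zip
                          (List.replicate mids.length '|' ++ ['/'])) =
      mids.map (fun u => (u, ('|', '|'))) ++ [(last, ('\\', '/'))] := by
  induction mids with
  | nil => rfl
  | cons m ms ih => simpa [List.replicate_succ, List.zip] using ih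

-- boxB on a first line + middles + last line
theorem boxB_concat (t last : List Char) (mids : List (List Char)) (m : Nat) :
    boxB (t :: (mids ++ [last])) m =
      (['/', ' '] ++ ljustSp t m ++ [' ', '\\']) ::
        (mids.map (fun u => ['|', ' '] ++ ljustSp u m ++ [' ', '|']) ++
         [['\\', ' '] ++ ljustSp last m ++ [' ', '/']]) := by
  cases mids with
  | nil => rfl
  | cons v vs =>
      rw [List.cons_append]
      simp only [boxB]
      rw [show v :: (vs ++ [last]) = (v :: vs) ++ [last] from rfl,
          List.dropLast_concat, List.getLastD_concat]

theorem boxA_eq_boxB (ls : List (List Char)) (m : Nat) : boxA ls m = boxB ls m := by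
  match ls with
  | [] => rfl
  | [t] => rfl
  | t :: u :: rest =>
      obtain ⟨mids, last, h⟩ := (List.eq_nil_or_concat (u :: rest)).resolve_left (by simp)
      rw [List.concat_eq_append] at h
      rw [h]
      have hN : (t :: (mids ++ [last])).length - 2 = mids.length := by simp
      rw [boxA.eq_def, if_neg (by simp), hN]
      simp only [List.zip_cons_cons]
      rw [zip_mid, boxB_concat]
      simp [ljustSp]

theorem assembleA_eq (ls : List (List Char)) : assembleA ls = assembleB ls := by
  unfold assembleA assembleB
  rw [boxA_eq_boxB]

-- ===== VERDICT (by name: the statement is the Claim_ definition above) =====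
theorem cowsay_spec : Claim_equal_cowsay := by
  intro text _ _
  unfold Spec_cowsay cowsay cowsay_alt
  rw [collapseA_eq, linesB_eq, assembleA_eq]
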